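-- pv_equiv track=rewrite | github.com/Jang4360/poc_v1 | etl/common/reference_loader.py | _deduplicate_elevator_rows
-- ===== SOURCE A (Python) =====
-- def _deduplicate_elevator_rows(rows: list[dict[str, str]]) -> tuple[list[dict[str, str]], int]:
--     valid: list[dict[str, str]] = []
--     seen: set[tuple[str, str, str]] = set()
--     duplicate_count = 0
--     for row in rows:
--         key = (row.get("stationId", ""), row.get("entranceNo", ""), row.get("point", ""))
--         if key in seen:
--             duplicate_count += 1
--             continue
--         seen.add(key)
--         valid.append(row)
--     return valid, duplicate_count
-- ===== SOURCE B (Python) =====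
-- def _deduplicate_elevator_rows(rows: list[dict[str, str]]) -> tuple[list[dict[str, str]], int]:
--     # Walk the rows BACKWARDS with last-write-wins overwriting: after the
--     # reversed pass, each key is mapped to the smallest index that carries it
--     # (the first occurrence in the original order).  Sorting those indices
--     # restores the original first-occurrence order; no membership test or
--     # duplicate branch is needed, and the duplicate count falls out of the
--     # lengths.
--     first_at: dict[tuple[str, str, str], int] = {}
--     for i, row in reversed(list(enumerate(rows))):
--         key = (row.get("stationId", ""), row.get("entranceNo", ""), row.get("point", ""))
--         first_at[key] = i
--     valid = [rows[i] for i in sorted(first_at.values())]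
--     return valid, len(rows) - len(valid)
-- ===== Notes on version B (the rewrite author's own statement) =====
-- stated objective: alternative
-- what changed: Replaces the forward seen-set scan with a reversed last-write-wins pass that records each key's smallest (first-occurrence) index in a dict, then sorts those indices to rebuild the deduplicated list and derives the duplicate count arithmetically from the lengths.
import Mathlib
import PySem

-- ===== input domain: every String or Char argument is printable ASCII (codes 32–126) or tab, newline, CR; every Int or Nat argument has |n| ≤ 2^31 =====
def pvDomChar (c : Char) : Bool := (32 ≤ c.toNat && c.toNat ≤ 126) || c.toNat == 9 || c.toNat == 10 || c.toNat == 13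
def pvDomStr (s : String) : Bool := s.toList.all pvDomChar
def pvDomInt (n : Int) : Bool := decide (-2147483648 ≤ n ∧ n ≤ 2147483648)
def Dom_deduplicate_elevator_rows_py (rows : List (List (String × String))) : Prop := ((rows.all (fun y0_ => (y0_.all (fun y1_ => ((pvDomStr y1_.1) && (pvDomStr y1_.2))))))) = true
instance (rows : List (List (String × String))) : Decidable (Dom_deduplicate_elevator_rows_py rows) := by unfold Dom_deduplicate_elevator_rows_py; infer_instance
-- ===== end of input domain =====

-- B replaces A's forward seen-set scan and duplicate-increment branch by a reversed last-write-wins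
-- pass recording each key's first-occurrence index, a sort of those indices, and an arithmetic count (alternative, same practical cost).

-- shared helper: the key tuple both Pythons compute with row.get(…, "")
def pvRowKey (row : List (String × String)) : String × String × String :=
  ((PySem.Dict.mk row).getD "stationId" "",
   (PySem.Dict.mk row).getD "entranceNo" "",
   (PySem.Dict.mk row).getD "point" "")

-- ===== PORT A =====
def deduplicate_elevator_rows_py (rows : List (List (String × String))) : (List (List (String × String))) × Int :=
  let st := rows.foldl
    (fun (st : List (List (String × String)) × PySem.Set (String × String × String) × Int) row =>
      let key := pvRowKey row
      if PySem.Set.contains st.2.1 key then (st.1, st.2.1, st.2.2 + 1)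
      else (st.1 ++ [row], PySem.Set.add st.2.1 key, st.2.2))
    (([] : List (List (String × String))), (PySem.Set.empty : PySem.Set (String × String × String)), (0 : Int))
  (st.1, st.2.2)

-- ===== PORT B =====
-- for i, row in reversed(list(enumerate(rows))): first_at[key] = i; then fetch rows[i] at the sorted indices
def deduplicate_elevator_rows_py_alt (rows : List (List (String × String))) : (List (List (String × String))) × Int :=
  let d := ((PySem.List.enumerate rows 0).reverse).foldl
    (fun (d : PySem.Dict (String × String × String) Int) p =>
      PySem.Dict.insert d (pvRowKey p.2) p.1)
    PySem.Dict.empty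
  let valid := (PySem.List.sorted (PySem.Dict.values d) (fun i => i) false).map
    (fun i => (PySem.List.pyGet? rows i).getD [])
  (valid, (rows.length : Int) - (valid.length : Int))

-- ===== PRECONDITION & SPEC =====
def Spec_deduplicate_elevator_rows_py (rows : List (List (String × String))) (out : (List (List (String × String))) × Int) : Prop := out = deduplicate_elevator_rows_py_alt rows
instance (rows : List (List (String × String))) (out : (List (List (String × String))) × Int) : Decidable (Spec_deduplicate_elevator_rows_py rows out) := by unfold Spec_deduplicate_elevator_rows_py; infer_instance

-- ===== CLAIM (what is proved, stated in full; the proofs are below) =====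
def Claim_equal_deduplicate_elevator_rows_py : Prop := ∀ (rows : List (List (String × String))), Dom_deduplicate_elevator_rows_py rows → Spec_deduplicate_elevator_rows_py rows (deduplicate_elevator_rows_py rows)

-- ===== LEMMAS AND PROOFS =====

theorem pvFilter_ind {α κ : Type} [BEq κ] (key : α → κ) (P : List α → Prop) (h1 : P [])
    (h2 : ∀ p t, P (t.filter (fun q => !(key q == key p))) → P (p :: t)) : ∀ e, P e := by
  intro e
  generalize hn : e.length = n
  induction n using Nat.strong_induction_on generalizing e with
  | _ n ih =>
    cases e with
    | nil => exact h1
    | cons p t =>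
      subst hn
      exact h2 p t (ih _ (Nat.lt_succ_of_le (List.length_filter_le _ _)) _ rfl)

def pvDedup : List (List (String × String)) → List (List (String × String))
  | [] => []
  | r :: t => r :: pvDedup (t.filter (fun x => !(pvRowKey x == pvRowKey r)))
termination_by l => l.length
decreasing_by simp only [List.length_unattach, List.length_cons]; exact Nat.lt_succ_of_le (le_trans (List.length_filter_le _ _) (by simp))
def pvDedupE : List (Int × List (String × String)) → List (Int × List (String × String))
  | [] => []
  | p :: t => p :: pvDedupE (t.filter (fun q => !(pvRowKey q.2 == pvRowKey p.2)))
termination_by l => l.length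
decreasing_by simp only [List.length_unattach, List.length_cons]; exact Nat.lt_succ_of_le (le_trans (List.length_filter_le _ _) (by simp))

lemma pvDedupE_sublist (e : List (Int × List (String × String))) : (pvDedupE e).Sublist e := by
  induction e using pvFilter_ind (key := fun q : Int × List (String × String) => pvRowKey q.2) with
  | h1 => simp [pvDedupE]
  | h2 p t ih =>
    rw [pvDedupE]
    exact List.Sublist.cons₂ p (ih.trans (List.filter_sublist))

lemma pvDedupE_map_snd (e : List (Int × List (String × String))) :
    (pvDedupE e).map (·.2) = pvDedup (e.map (·.2)) := by
  induction e using pvFilter_ind (key := fun q : Int × List (String × String) => pvRowKey q.2) with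
  | h1 => simp [pvDedupE, pvDedup]
  | h2 p t ih =>
    rw [pvDedupE, List.map_cons, List.map_cons, pvDedup]
    rw [List.cons.injEq]
    refine ⟨rfl, ?_⟩
    rw [ih, List.filter_map]
    rfl

lemma pvDedupE_filter_key (k : String × String × String) (e : List (Int × List (String × String))) :
    pvDedupE (e.filter (fun q => !(pvRowKey q.2 == k)))
      = (pvDedupE e).filter (fun q => !(pvRowKey q.2 == k)) := by
  induction e using pvFilter_ind (key := fun q : Int × List (String × String) => pvRowKey q.2) with
  | h1 => simp [pvDedupE]
  | h2 p t ih =>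
    by_cases hk : pvRowKey p.2 = k
    · subst hk
      rw [List.filter_cons_of_neg (p := fun q : Int × List (String × String) => !(pvRowKey q.2 == pvRowKey p.2)) (by simp),
        pvDedupE, List.filter_cons_of_neg (p := fun q : Int × List (String × String) => !(pvRowKey q.2 == pvRowKey p.2)) (by simp)]
      have hall : ∀ q ∈ pvDedupE (t.filter (fun q => !(pvRowKey q.2 == pvRowKey p.2))),
          (!(pvRowKey q.2 == pvRowKey p.2)) = true := by
        intro q hq
        simpa using List.of_mem_filter ((pvDedupE_sublist _).subset hq)
      rw [(List.filter_eq_self).2 hall]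
    · have hpk : (!(pvRowKey p.2 == k)) = true := by simpa using hk
      rw [List.filter_cons_of_pos (p := fun q : Int × List (String × String) => !(pvRowKey q.2 == k)) hpk, pvDedupE, pvDedupE,
        List.filter_cons_of_pos (p := fun q : Int × List (String × String) => !(pvRowKey q.2 == k)) hpk]
      rw [List.cons.injEq]
      refine ⟨rfl, ?_⟩
      rw [List.filter_filter, ← ih, List.filter_filter]
      exact congrArg pvDedupE (List.filter_congr (fun a _ => Bool.and_comm _ _))

lemma pvDedupE_keyset (e : List (Int × List (String × String))) :
    ∀ p ∈ e, ∃ q ∈ pvDedupE e, pvRowKey q.2 = pvRowKey p.2 := by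
  induction e using pvFilter_ind (key := fun q : Int × List (String × String) => pvRowKey q.2) with
  | h1 => simp
  | h2 p t ih =>
    intro x hx
    rw [pvDedupE]
    rcases List.mem_cons.1 hx with h | h
    · exact ⟨p, List.mem_cons_self, by rw [h]⟩
    · by_cases hk : pvRowKey x.2 = pvRowKey p.2
      · exact ⟨p, List.mem_cons_self, by rw [hk]⟩
      · obtain ⟨q, hq, hqk⟩ := ih x (List.mem_filter.2 ⟨h, by simpa using hk⟩)
        exact ⟨q, List.mem_cons_of_mem _ hq, hqk⟩

lemma pvDedupE_keys_nodup (e : List (Int × List (String × String))) :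
    ((pvDedupE e).map (fun q => pvRowKey q.2)).Nodup := by
  induction e using pvFilter_ind (key := fun q : Int × List (String × String) => pvRowKey q.2) with
  | h1 => simp [pvDedupE]
  | h2 p t ih =>
    rw [pvDedupE, List.map_cons, List.nodup_cons]
    refine ⟨?_, ih⟩
    intro hmem
    obtain ⟨q, hq, hqk⟩ := List.mem_map.1 hmem
    have := List.of_mem_filter ((pvDedupE_sublist _).subset hq)
    rw [hqk] at this
    simp at this

lemma pv_replace_perm {ν : Type} (k : String × String × String) (v : ν) :
    ∀ (L : List ((String × String × String) × ν)), (L.map Prod.fst).Nodup →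
    k ∈ L.map Prod.fst →
    (L.map (fun p => if p.1 == k then (k, v) else p)).Perm
      ((k, v) :: L.filter (fun p => !(p.1 == k))) := by
  intro L
  induction L with
  | nil => simp
  | cons p t ih =>
    intro hnd hk
    rw [List.map_cons, List.nodup_cons] at hnd
    by_cases hp : p.1 = k
    · have hb : (p.1 == k) = true := by simpa using hp
      have hkn : k ∉ t.map Prod.fst := hp ▸ hnd.1
      have ht : t.map (fun p => if p.1 == k then (k, v) else p) = t := by
        rw [show t = t.map id by simp]
        rw [List.map_map]
        apply List.map_congr_left
        intro q hq
        have : ¬ q.1 = k := fun h => hkn (h ▸ List.mem_map_of_mem hq)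
        simp [this]
      have hf : t.filter (fun p => !(p.1 == k)) = t := by
        apply List.filter_eq_self.2
        intro q hq
        have : ¬ q.1 = k := fun h => hkn (h ▸ List.mem_map_of_mem hq)
        simpa using this
      rw [List.map_cons, if_pos hb, ht, List.filter_cons_of_neg (by simpa using hp), hf]
    · have hb : (p.1 == k) = false := by simpa using hp
      have hk' : k ∈ t.map Prod.fst := by
        rcases List.mem_cons.1 hk with h | h
        · exact absurd h.symm hp
        · exact h
      have := ih hnd.2 hk'
      rw [List.map_cons, if_neg (by simp [hb]), List.filter_cons_of_pos (by simp [hb])]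
      exact (this.cons p).trans (List.Perm.swap _ _ _)

lemma pv_dictB (t : List (List (String × String))) : ∀ (s : Int),
    (((PySem.List.enumerate t s).reverse).foldl
      (fun (d : PySem.Dict (String × String × String) Int) p =>
        PySem.Dict.insert d (pvRowKey p.2) p.1) PySem.Dict.empty).items.Perm
    ((pvDedupE (PySem.List.enumerate t s)).map (fun p => (pvRowKey p.2, p.1))) := by
  induction t with
  | nil => simp [PySem.List.enumerate, pvDedupE, PySem.Dict.empty]
  | cons r t ih =>
    intro s
    rw [PySem.List.enumerate_cons, List.reverse_cons, List.foldl_append]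
    set e' := PySem.List.enumerate t (s + 1) with he'
    set d' := (e'.reverse).foldl
      (fun (d : PySem.Dict (String × String × String) Int) p =>
        PySem.Dict.insert d (pvRowKey p.2) p.1) PySem.Dict.empty with hd'
    have ihs := ih (s + 1)
    rw [← he', ← hd'] at ihs
    -- keys of d' are a permutation of the dedup'd keys of e'
    have hkeys : (d'.items.map Prod.fst).Perm ((pvDedupE e').map (fun q => pvRowKey q.2)) := by
      have := ihs.map Prod.fst
      rwa [List.map_map] at this
    have hknd : (d'.items.map Prod.fst).Nodup := hkeys.nodup_iff.2 (pvDedupE_keys_nodup e')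
    simp only [List.foldl_cons, List.foldl_nil]
    rw [pvDedupE]
    by_cases hc : d'.contains (pvRowKey r) = true
    · -- overwrite case
      have hkmem : pvRowKey r ∈ d'.items.map Prod.fst :=
        (PySem.Dict.contains_iff_mem_keys d' _).1 hc
      rw [PySem.Dict.items_insert_of_contains d' s hc]
      refine (pv_replace_perm _ s d'.items hknd hkmem).trans ?_
      rw [List.map_cons]
      refine List.Perm.cons _ ?_
      have hfilter := ihs.filter (fun p => !(p.1 == pvRowKey r))
      refine hfilter.trans ?_
      rw [List.filter_map, pvDedupE_filter_key]
      exact List.Perm.of_eq rfl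
    · -- fresh-key case
      have hc' : d'.contains (pvRowKey r) = false := by simpa using hc
      rw [PySem.Dict.items_insert_of_not_contains d' s hc']
      refine (List.perm_append_singleton _ _).trans ?_
      rw [List.map_cons]
      refine List.Perm.cons _ ?_
      have hnok : ∀ q ∈ e', ¬ pvRowKey q.2 = pvRowKey r := by
        intro q hq hkq
        obtain ⟨q', hq', hq'k⟩ := pvDedupE_keyset e' q hq
        have : pvRowKey r ∈ (pvDedupE e').map (fun q => pvRowKey q.2) := by
          rw [← hkq, ← hq'k]
          exact List.mem_map_of_mem hq'
        have : pvRowKey r ∈ d'.items.map Prod.fst := hkeys.mem_iff.2 this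
        rw [Bool.eq_false_iff] at hc'
        exact hc' ((PySem.Dict.contains_iff_mem_keys d' _).2 this)
      have hfe : e'.filter (fun q => !(pvRowKey q.2 == pvRowKey r)) = e' := by
        apply List.filter_eq_self.2
        intro q hq
        simpa using hnok q hq
      rw [hfe]
      exact ihs

lemma pv_contains_add (S : PySem.Set (String × String × String)) (k x : String × String × String) :
    PySem.Set.contains (PySem.Set.add S k) x = (PySem.Set.contains S x || (x == k)) := by
  by_cases hc : PySem.Set.contains S k = true
  · rw [PySem.Set.add, if_pos hc]
    by_cases hx : x = k
    · subst hx
      simp only [BEq.refl, Bool.or_true]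
      exact hc
    · simp [hx]
  · rw [PySem.Set.add, if_neg hc]
    have hbd : (x == k) = decide (x = k) := by
      by_cases h : x = k <;> simp [h]
    simp [PySem.Set.contains, hbd]

lemma pv_foldA (l : List (List (String × String))) : ∀ (v : List (List (String × String)))
    (S : PySem.Set (String × String × String)) (c : Int),
    l.foldl
      (fun (st : List (List (String × String)) × PySem.Set (String × String × String) × Int) row =>
        let key := pvRowKey row
        if PySem.Set.contains st.2.1 key then (st.1, st.2.1, st.2.2 + 1)
        else (st.1 ++ [row], PySem.Set.add st.2.1 key, st.2.2))
      (v, S, c)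
    = (v ++ pvDedup (l.filter (fun r => !(PySem.Set.contains S (pvRowKey r)))),
       PySem.Set.update S (l.map pvRowKey),
       c + (l.length : Int) - ((pvDedup (l.filter (fun r => !(PySem.Set.contains S (pvRowKey r))))).length : Int)) := by
  induction l with
  | nil => simp [pvDedup, PySem.Set.update]
  | cons r t ih =>
    intro v S c
    simp only [List.foldl_cons]
    by_cases hc : PySem.Set.contains S (pvRowKey r) = true
    · rw [if_pos hc, ih]
      have hf : (r :: t).filter (fun r => !(PySem.Set.contains S (pvRowKey r)))
          = t.filter (fun r => !(PySem.Set.contains S (pvRowKey r))) :=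
        List.filter_cons_of_neg (by rw [hc]; simp)
      have hupd : PySem.Set.update S ((r :: t).map pvRowKey)
          = PySem.Set.update S (t.map pvRowKey) := by
        rw [List.map_cons, PySem.Set.update, List.foldl_cons, PySem.Set.add, if_pos hc, PySem.Set.update]
      rw [hf, hupd]
      refine congrArg _ (congrArg _ ?_)
      simp only [List.length_cons]
      push_cast
      ring
    · have hc' : PySem.Set.contains S (pvRowKey r) = false := by simpa using hc
      rw [if_neg (by rw [hc']; simp), ih]
      have hf : (r :: t).filter (fun r => !(PySem.Set.contains S (pvRowKey r)))
          = r :: t.filter (fun r => !(PySem.Set.contains S (pvRowKey r))) :=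
        List.filter_cons_of_pos (by rw [Bool.not_eq_eq_eq_not]; exact hc')
      have hff : t.filter (fun x => !(PySem.Set.contains (PySem.Set.add S (pvRowKey r)) (pvRowKey x)))
          = (t.filter (fun x => !(PySem.Set.contains S (pvRowKey x)))).filter
              (fun x => !(pvRowKey x == pvRowKey r)) := by
        rw [List.filter_filter]
        apply List.filter_congr
        intro a _
        rw [pv_contains_add]
        simp [Bool.not_or, Bool.and_comm]
      have hupd : PySem.Set.update S ((r :: t).map pvRowKey)
          = PySem.Set.update (PySem.Set.add S (pvRowKey r)) (t.map pvRowKey) := by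
        rw [List.map_cons, PySem.Set.update, List.foldl_cons]
        rfl
      rw [hf, hupd, hff]
      rw [pvDedup]
      refine Prod.ext ?_ (Prod.ext rfl ?_)
      · show v ++ [r] ++ _ = v ++ r :: _
        simp
      · show c + (t.length : Int) - _ = c + ((r :: t).length : Int) - _
        simp only [List.length_cons]
        push_cast
        ring

-- ===== VERDICT (by name: the statement is the Claim_ definition above) =====
theorem deduplicate_elevator_rows_py_spec : Claim_equal_deduplicate_elevator_rows_py := by
  intro rows _
  unfold Spec_deduplicate_elevator_rows_py deduplicate_elevator_rows_py deduplicate_elevator_rows_py_alt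

  have hA := pv_foldA rows [] PySem.Set.empty 0
  have hfe : rows.filter (fun r => !(PySem.Set.contains PySem.Set.empty (pvRowKey r))) = rows := by
    apply List.filter_eq_self.2
    intro q hq
    rfl
  rw [hfe] at hA
  rw [hA]
  dsimp only
  rw [List.nil_append]
  set e := PySem.List.enumerate rows 0 with he
  have hperm := pv_dictB rows 0
  rw [← he] at hperm
  have hvals : (((e.reverse).foldl
      (fun (d : PySem.Dict (String × String × String) Int) p =>
        PySem.Dict.insert d (pvRowKey p.2) p.1) PySem.Dict.empty).values).Perm
      ((pvDedupE e).map (fun p => p.1)) := by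
    have := hperm.map (fun x => x.2)
    rw [List.map_map] at this
    exact this
  have hpw : ((pvDedupE e).map (fun p => p.1)).Pairwise (fun a b => a < b) := by
    rw [List.pairwise_map]
    exact ((PySem.List.pairwise_lt_enumerate rows 0).sublist (pvDedupE_sublist e))
  have hsorted : PySem.List.sorted (((e.reverse).foldl
      (fun (d : PySem.Dict (String × String × String) Int) p =>
        PySem.Dict.insert d (pvRowKey p.2) p.1) PySem.Dict.empty).values) (fun i => i) false
      = (pvDedupE e).map (fun p => p.1) := by
    apply PySem.List.sorted_eq_of_perm_of_pairwise_lt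
    · exact hvals.symm
    · exact hpw
  rw [hsorted, List.map_map]
  -- placeholder
  have hfetch : ((pvDedupE e).map (fun p => (PySem.List.pyGet? rows p.1).getD [])) = (pvDedupE e).map (fun p => p.2) := by
    apply List.map_congr_left
    intro p hp
    have hpe : p ∈ e := (pvDedupE_sublist e).subset hp
    obtain ⟨k, hk, hpk⟩ := (PySem.List.mem_enumerate_iff rows 0 p).1 hpe
    subst hpk
    rw [show ((0 : Int) + (k : Int)) = (k : Int) by ring, PySem.List.pyGet?_natCast]
    simp [hk]
  have hsnd : (pvDedupE e).map (fun p => p.2) = pvDedup rows := by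
    rw [pvDedupE_map_snd, he, PySem.List.map_snd_enumerate]
  have hcomp : List.map ((fun i => (PySem.List.pyGet? rows i).getD []) ∘ fun p => p.1) (pvDedupE e)
      = pvDedup rows := by
    rw [show ((fun i => (PySem.List.pyGet? rows i).getD []) ∘ fun p : Int × List (String × String) => p.1)
        = fun p : Int × List (String × String) => (PySem.List.pyGet? rows p.1).getD [] from rfl]
    rw [hfetch, hsnd]
  refine Prod.ext ?_ ?_
  · show pvDedup rows = _
    rw [hcomp]
  · show (0 : Int) + (rows.length : Int) - ((pvDedup rows).length : Int) = _
    show _ = (rows.length : Int) - _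
    rw [hcomp]
    ring
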